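-- pv_equiv track=rewrite | github.com/sprat-kv/ClariQ | src/g_sia/agents/sql_agent.py | parse
-- ===== SOURCE A (Python) =====
-- def parse(text: str) -> str:
--     """Parse and validate SQL output."""
--     # Extract SQL from the response
--     lines = text.strip().split('\n')
--     sql_lines = []
--
--     in_sql = False
--     for line in lines:
--         line = line.strip()
--         if line.upper().startswith(('SELECT', 'WITH')):
--             in_sql = True
--
--         if in_sql:
--             sql_lines.append(line)
--
--         # Stop at semicolon or end of SQL statement
--         if in_sql and (line.endswith(';') or line.upper().startswith(('LIMIT', 'ORDER BY'))):
--             break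
--
--     sql = ' '.join(sql_lines).strip()
--
--     # Remove trailing semicolon if present
--     if sql.endswith(';'):
--         sql = sql[:-1]
--
--     return sql
-- ===== SOURCE B (Python) =====
-- def _is_start(line):
--     u = line.upper()
--     return u.startswith('SELECT') or u.startswith('WITH')
--
--
-- def _is_stop(line):
--     return line.endswith(';') or line.upper().startswith(('LIMIT', 'ORDER BY'))
--
--
-- def parse(text: str) -> str:
--     """Parse and validate SQL output (index arithmetic + slicing, no collection loop)."""
--     lines = [ln.strip() for ln in text.strip().split('\n')]
--     n = len(lines)
--     s = min((i for i in range(n) if _is_start(lines[i])), default=n)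
--     if s == n:
--         return ''
--     e = min((i for i in range(s, n) if _is_stop(lines[i])), default=n - 1)
--     sql = ' '.join(lines[s:e + 1]).strip()
--     return sql.removesuffix(';')
-- ===== Notes on version B (the rewrite author's own statement) =====
-- stated objective: alternative
-- what changed: Replaces A's stateful append-and-break loop by pure index arithmetic: compute the start index (first SELECT/WITH line) and stop index (first terminator at or after it) with min over filtered ranges, then slice lines[s:e+1] and join - no sticky flag, no accumulator loop, no break.
import Mathlib
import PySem

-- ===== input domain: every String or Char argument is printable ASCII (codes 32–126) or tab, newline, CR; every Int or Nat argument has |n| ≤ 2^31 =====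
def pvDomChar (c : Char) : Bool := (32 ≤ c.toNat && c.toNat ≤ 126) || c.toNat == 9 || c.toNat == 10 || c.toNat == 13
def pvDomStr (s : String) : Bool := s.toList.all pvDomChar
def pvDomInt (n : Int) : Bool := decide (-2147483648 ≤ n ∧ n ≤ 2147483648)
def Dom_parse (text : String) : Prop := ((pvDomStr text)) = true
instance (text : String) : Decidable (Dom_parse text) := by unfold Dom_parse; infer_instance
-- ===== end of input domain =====

-- B replaces A's stateful append-and-break loop by pure index arithmetic (min over filtered index
-- ranges, then one slice); objective: alternative, same cost.

-- ===== PORT A =====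
-- A's single loop with the sticky in_sql flag and a break
def loopA : List String → Bool → List String → List String
  | [], _, acc => acc
  | l :: rest, inSql, acc =>
    let line := PySem.Str.strip l
    let inSql := inSql || (PySem.Str.startswith (PySem.Str.upper line) "SELECT" ||
                           PySem.Str.startswith (PySem.Str.upper line) "WITH")
    let acc := if inSql then acc ++ [line] else acc
    if inSql && (PySem.Str.endswith line ";" ||
                 (PySem.Str.startswith (PySem.Str.upper line) "LIMIT" ||
                  PySem.Str.startswith (PySem.Str.upper line) "ORDER BY")) then acc
    else loopA rest inSql acc

def parse (text : String) : String :=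
  let lines := (PySem.Chars.splitOn (PySem.Str.strip text).toList "\n".toList).map String.ofList
  let sql := PySem.Str.strip (PySem.Str.join " " (loopA lines false []))
  if PySem.Str.endswith sql ";" then PySem.Str.slice sql none (some (-1)) else sql

-- ===== PORT B =====
def isStart (line : String) : Bool :=
  let u := PySem.Str.upper line
  PySem.Str.startswith u "SELECT" || PySem.Str.startswith u "WITH"

def isStop (line : String) : Bool :=
  let u := PySem.Str.upper line
  PySem.Str.endswith line ";" || PySem.Str.startswith u "LIMIT" || PySem.Str.startswith u "ORDER BY"

-- min((i for i in range(n) if ...), default=n), etc., then a single slice lines[s:e+1]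
def parse_alt (text : String) : String :=
  let lines := ((PySem.Chars.splitOn (PySem.Str.strip text).toList "\n".toList).map String.ofList).map PySem.Str.strip
  let n := lines.length
  let s := PySem.List.minD ((List.range n).filter (fun i => isStart (lines.getD i ""))) (fun x => x) n
  if s = n then ""
  else
    let e := PySem.List.minD ((List.range' s (n - s)).filter (fun i => isStop (lines.getD i ""))) (fun x => x) (n - 1)
    let sql := PySem.Str.strip (PySem.Str.join " " (PySem.List.slice lines (some (s : Int)) (some ((e : Int) + 1))))
    if PySem.Str.endswith sql ";" then PySem.Str.slice sql none (some (-1)) else sql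

-- ===== PRECONDITION & SPEC =====
def Spec_parse (text : String) (out : String) : Prop := out = parse_alt text
instance (text : String) (out : String) : Decidable (Spec_parse text out) := by unfold Spec_parse; infer_instance

-- ===== CLAIM (what is proved, stated in full; the proofs are below) =====
def Claim_equal_parse : Prop := ∀ (text : String), Dom_parse text → Spec_parse text (parse text)

-- ===== LEMMAS AND PROOFS =====

-- A's collection phase, expressed as take-until-stop (inclusive); used only in the proofs
def collectB : List String → List String
  | [] => []
  | l :: rest => if isStop l then [l] else l :: collectB rest

-- once the flag is set, A's loop appends every stripped line and breaks on a stop line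
theorem loopA_true (ls : List String) (acc : List String) :
    loopA ls true acc = acc ++ collectB (ls.map PySem.Str.strip) := by
  induction ls generalizing acc with
  | nil => simp [loopA, collectB]
  | cons l rest ih =>
    have hsp : (PySem.Str.endswith (PySem.Str.strip l) ";" ||
                (PySem.Str.startswith (PySem.Str.upper (PySem.Str.strip l)) "LIMIT" ||
                 PySem.Str.startswith (PySem.Str.upper (PySem.Str.strip l)) "ORDER BY"))
             = isStop (PySem.Str.strip l) := by
      simp [isStop, Bool.or_assoc]
    simp only [loopA, List.map_cons, collectB, Bool.true_or, if_true, Bool.true_and, hsp]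
    cases h : isStop (PySem.Str.strip l) <;> simp [h, ih]

-- A's whole loop from the unset flag: skip until the first start line, then collect until a stop
theorem loopA_false (ls : List String) (acc : List String) :
    loopA ls false acc = acc ++
      (match (ls.map PySem.Str.strip).findIdx? isStart with
       | none => []
       | some i => collectB ((ls.map PySem.Str.strip).drop i)) := by
  induction ls generalizing acc with
  | nil => simp [loopA]
  | cons l rest ih =>
    have hst : (PySem.Str.startswith (PySem.Str.upper (PySem.Str.strip l)) "SELECT" ||
                PySem.Str.startswith (PySem.Str.upper (PySem.Str.strip l)) "WITH")
             = isStart (PySem.Str.strip l) := by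
      simp [isStart]
    have hsp : (PySem.Str.endswith (PySem.Str.strip l) ";" ||
                (PySem.Str.startswith (PySem.Str.upper (PySem.Str.strip l)) "LIMIT" ||
                 PySem.Str.startswith (PySem.Str.upper (PySem.Str.strip l)) "ORDER BY"))
             = isStop (PySem.Str.strip l) := by
      simp [isStop, Bool.or_assoc]
    simp only [loopA, Bool.false_or, List.map_cons, List.findIdx?_cons, hst, hsp]
    cases hs : isStart (PySem.Str.strip l) with
    | true =>
      simp only [if_true, Bool.true_and, collectB, List.drop_zero]
      cases h : isStop (PySem.Str.strip l) <;>
        simp [h, loopA_true, List.append_assoc]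
    | false =>
      simp only [Bool.false_and]
      rw [ih]
      cases h : (rest.map PySem.Str.strip).findIdx? isStart <;> simp

-- B's min over a filtered index range IS "first index ≥ s satisfying q, else the default"
theorem minD_filter_range' (q : String → Bool) (ls : List String) (s d : Nat) :
    PySem.List.minD ((List.range' s (ls.length - s)).filter (fun i => q (ls.getD i ""))) (fun x => x) d
    = (match (ls.drop s).findIdx? q with
       | some j => s + j
       | none => d) := by
  cases h : (ls.drop s).findIdx? q with
  | none =>
    have hnil : (List.range' s (ls.length - s)).filter (fun i => q (ls.getD i "")) = [] := by
      rw [List.filter_eq_nil_iff]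
      intro i hi
      rw [List.mem_range'_1] at hi
      have hil : i < ls.length := by omega
      have hlt : i - s < (ls.drop s).length := by rw [List.length_drop]; omega
      have key : q ((ls.drop s)[i - s]'hlt) = false :=
        List.findIdx?_eq_none_iff.mp h _ (List.getElem_mem hlt)
      have hd : ls[i]'hil = (ls.drop s)[i - s]'hlt := by
        rw [List.getElem_drop]; congr 1; omega
      rw [List.getD_eq_getElem _ _ hil, hd, key]
      simp
    rw [hnil]
    rfl
  | some j =>
    obtain ⟨hj, hqj, hmin⟩ := List.findIdx?_eq_some_iff_getElem.mp h
    have hjl : j < ls.length - s := by simpa using hj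
    have hmem : s + j ∈ (List.range' s (ls.length - s)).filter (fun i => q (ls.getD i "")) := by
      rw [List.mem_filter, List.mem_range'_1]
      refine ⟨⟨by omega, by omega⟩, ?_⟩
      have hd : ls.getD (s + j) "" = (ls.drop s)[j] := by
        rw [List.getD_eq_getElem _ _ (by omega), List.getElem_drop]
      rw [hd]; exact hqj
    cases hm : PySem.List.min? ((List.range' s (ls.length - s)).filter (fun i => q (ls.getD i ""))) (fun x => x) with
    | none =>
      have hnil := (PySem.List.min?_eq_none_iff _ _).mp hm
      rw [hnil] at hmem
      exact absurd hmem List.not_mem_nil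
    | some m =>
      have hmmem := PySem.List.min?_mem hm
      have hle : m ≤ s + j := PySem.List.min?_isMin hm _ hmem
      rw [List.mem_filter, List.mem_range'_1] at hmmem
      obtain ⟨⟨hsm, hmlt⟩, hqm⟩ := hmmem
      have hmlen : m < ls.length := by omega
      have hdg : (ls.drop s)[m - s]'(by simp; omega) = ls.getD m "" := by
        rw [List.getD_eq_getElem _ _ hmlen, List.getElem_drop]
        congr 1; omega
      have hge : j ≤ m - s := by
        by_contra hc
        push_neg at hc
        exact hmin (m - s) hc (by rw [hdg]; exact hqm)
      have hms : m = s + j := by omega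
      simp only [PySem.List.minD, hm, hms, Option.getD_some]

-- take-until-stop (inclusive) as a take of a prefix length
theorem collectB_take (l : List String) :
    collectB l = l.take (((l.findIdx? isStop).getD (l.length - 1)) + 1) := by
  induction l with
  | nil => simp [collectB]
  | cons a t ih =>
    simp only [collectB, List.findIdx?_cons]
    cases h : isStop a with
    | true => simp
    | false =>
      simp only [Bool.false_eq_true, if_false]
      cases ht : t.findIdx? isStop with
      | some j =>
        simp only [ht, Option.map_some, Option.getD_some] at ih ⊢
        rw [List.take_succ_cons, ih]
      | none =>
        simp only [ht, Option.map_none, Option.getD_none] at ih ⊢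
        cases t with
        | nil => simp [collectB]
        | cons b u =>
          simp only [List.length_cons] at ih ⊢
          have h1 : u.length + 1 - 1 + 1 = u.length + 1 := by omega
          have h2 : u.length + 1 + 1 - 1 + 1 = u.length + 1 + 1 := by omega
          rw [h1] at ih
          rw [h2, List.take_succ_cons, ← ih]

-- ===== VERDICT (by name: the statement is the Claim_ definition above) =====
theorem parse_spec : Claim_equal_parse := by
  intro text _
  unfold Spec_parse parse parse_alt
  simp only [loopA_false, List.nil_append]
  have hr : List.range (((PySem.Chars.splitOn (PySem.Str.strip text).toList "\n".toList).map String.ofList).map PySem.Str.strip).length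
      = List.range' 0 ((((PySem.Chars.splitOn (PySem.Str.strip text).toList "\n".toList).map String.ofList).map PySem.Str.strip).length - 0) := by
    simp [List.range_eq_range']
  rw [hr, minD_filter_range' isStart _ 0]
  set L := (((PySem.Chars.splitOn (PySem.Str.strip text).toList "\n".toList).map String.ofList).map PySem.Str.strip) with hL
  cases h : L.findIdx? isStart with
  | none =>
    simp only [List.drop_zero, h, if_true]
    rfl
  | some i =>
    obtain ⟨hi, _, _⟩ := List.findIdx?_eq_some_iff_getElem.mp h
    simp only [List.drop_zero, h, Nat.zero_add]
    have hne : ¬ (i = L.length) := by omega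
    rw [if_neg hne, minD_filter_range' isStop]
    rw [collectB_take]
    cases hs : (L.drop i).findIdx? isStop with
    | some j =>
      obtain ⟨hjl, _, _⟩ := List.findIdx?_eq_some_iff_getElem.mp hs
      simp only [Option.getD_some]
      rw [show (((i + j : Nat) : Int) + 1) = (((i + j + 1 : Nat)) : Int) from by push_cast; ring,
          PySem.List.slice_natCast,
          show i + j + 1 - i = j + 1 from by omega]
    | none =>
      simp only [Option.getD_none]
      rw [show (((L.length - 1 : Nat) : Int) + 1) = ((L.length : Int)) from by omega,
          PySem.List.slice_natCast,
          show (L.drop i).length - 1 + 1 = L.length - i from by simp; omega]
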